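-- pv_equiv track=rewrite | github.com/chiragvartak/bullsandcows | utils.py | cows
-- ===== SOURCE A (Python) =====
-- def cows(original, guess):
--     original_set = set()
--     covered_set = set()
--     cowCount = 0
--     for letter in original:
--         original_set.add(letter.lower())
--     for letter in guess:
--         if letter.lower() in original_set and letter.lower() not in covered_set:
--             cowCount += 1
--             covered_set.add(letter.lower())
--     return cowCount
-- ===== SOURCE B (Python) =====
-- def _sorted_unique(s):
--     t = sorted(c.lower() for c in s)
--     res = []
--     for c in t:
--         if not res or res[-1] != c:
--             res.append(c)
--     return res
--
-- def _merge_count(a, b):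
--     if not a or not b:
--         return 0
--     if a[0] == b[0]:
--         return 1 + _merge_count(a[1:], b[1:])
--     if a[0] < b[0]:
--         return _merge_count(a[1:], b)
--     return _merge_count(a, b[1:])
--
-- def cows(original, guess):
--     return _merge_count(_sorted_unique(original), _sorted_unique(guess))
-- ===== Notes on version B (the rewrite author's own statement) =====
-- stated objective: alternative
-- what changed: Replaces A's hash-set membership loop (original_set + covered_set + counter) with sort-then-merge: both strings are lowercased, sorted and deduplicated by adjacent comparison, then a two-pointer merge counts common characters.
import Mathlib
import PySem

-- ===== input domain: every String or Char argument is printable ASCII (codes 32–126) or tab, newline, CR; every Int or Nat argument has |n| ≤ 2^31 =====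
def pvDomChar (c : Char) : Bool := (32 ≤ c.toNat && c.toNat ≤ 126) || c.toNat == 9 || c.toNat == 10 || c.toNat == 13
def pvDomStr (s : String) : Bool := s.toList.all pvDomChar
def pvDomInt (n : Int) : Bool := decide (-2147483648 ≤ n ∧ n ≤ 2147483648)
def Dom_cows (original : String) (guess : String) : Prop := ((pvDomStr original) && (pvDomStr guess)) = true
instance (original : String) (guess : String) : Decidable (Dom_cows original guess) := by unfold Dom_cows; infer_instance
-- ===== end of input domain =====

-- B replaces A's hash-set loops by sort-then-merge: lowercase, sort, dedup adjacent,
-- then count common characters with a two-pointer merge (alternative algorithm, not faster).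

-- ===== PORT A =====
-- literal port: build original_set by a loop of adds, then loop over guess
-- maintaining (covered_set, cowCount)
def cows (original : String) (guess : String) : Int :=
  let original_set : PySem.Set Char :=
    original.toList.foldl (fun s letter => PySem.Set.add s (PySem.Chars.lowerChar letter)) PySem.Set.empty
  let res : PySem.Set Char × Int :=
    guess.toList.foldl (fun st letter =>
      if PySem.Set.contains original_set (PySem.Chars.lowerChar letter)
          && !(PySem.Set.contains st.1 (PySem.Chars.lowerChar letter))
      then (PySem.Set.add st.1 (PySem.Chars.lowerChar letter), st.2 + 1)
      else st) (PySem.Set.empty, 0)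
  res.2

-- ===== PORT B =====
-- the loop body of _sorted_unique's dedup loop: 'if not res or res[-1] != c: res.append(c)'
def suStep (res : List Char) (c : Char) : List Char :=
  if res.isEmpty || !(PySem.List.pyGet? res (-1) == some c) then res ++ [c] else res

-- _sorted_unique: sort the lowercased characters, then drop adjacent duplicates
def sortedUnique (s : String) : List Char :=
  let t := PySem.List.sorted (s.toList.map PySem.Chars.lowerChar) (fun c => c) false
  t.foldl suStep []

-- _merge_count: two-pointer merge of two lists (Python's a[1:] = tail)
def mergeCount : List Char → List Char → Int
  | [], _ => 0
  | _ :: _, [] => 0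
  | x :: xs, y :: ys =>
    if x == y then 1 + mergeCount xs ys
    else if x < y then mergeCount xs (y :: ys)
    else mergeCount (x :: xs) ys
termination_by a b => a.length + b.length

def cows_alt (original : String) (guess : String) : Int :=
  mergeCount (sortedUnique original) (sortedUnique guess)

-- ===== PRECONDITION & SPEC =====
def Spec_cows (original : String) (guess : String) (out : Int) : Prop := out = cows_alt original guess
instance (original : String) (guess : String) (out : Int) : Decidable (Spec_cows original guess out) := by unfold Spec_cows; infer_instance

-- ===== CLAIM (what is proved, stated in full; the proofs are below) =====
def Claim_equal_cows : Prop := ∀ (original : String) (guess : String), Dom_cows original guess → Spec_cows original guess (cows original guess)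

-- ===== LEMMAS AND PROOFS =====

-- ---- A side: A's result is the length of the filtered dedup of the lowered guess ----

-- the guarded-add step of A's guess loop, on the set component only
def gStep (t : PySem.Set Char) (s : PySem.Set Char) (x : Char) : PySem.Set Char :=
  if PySem.Set.contains t x && !(PySem.Set.contains s x) then PySem.Set.add s x else s

-- add-if-member step (no covered test), pointwise equal to gStep
def hStep (t : PySem.Set Char) (s : PySem.Set Char) (x : Char) : PySem.Set Char :=
  if PySem.Set.contains t x then PySem.Set.add s x else s

theorem gStep_eq_hStep (t s : PySem.Set Char) (x : Char) : gStep t s x = hStep t s x := by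
  simp only [gStep, hStep, PySem.Set.add, PySem.Set.contains]
  by_cases ht : x ∈ t <;> by_cases hs : x ∈ s <;> simp [ht, hs]

theorem loop_count (t : PySem.Set Char) :
    ∀ (l : List Char) (s : PySem.Set Char) (n : Int),
      l.foldl (fun st x =>
        if PySem.Set.contains t x && !(PySem.Set.contains st.1 x)
        then (PySem.Set.add st.1 x, st.2 + 1) else st) (s, n)
      = (l.foldl (gStep t) s, n + (l.foldl (gStep t) s).length - s.length) := by
  intro l
  induction l with
  | nil => intro s n; simp
  | cons x xs ih =>
    intro s n
    simp only [List.foldl_cons]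
    by_cases hc : PySem.Set.contains t x && !(PySem.Set.contains s x)
    · have hs : x ∉ s := by
        simp only [Bool.and_eq_true, Bool.not_eq_true'] at hc
        simpa [PySem.Set.contains] using hc.2
      have hadd : PySem.Set.add s x = s ++ [x] := by
        simp [PySem.Set.add, PySem.Set.contains, hs]
      have hg : gStep t s x = PySem.Set.add s x := by rw [gStep, if_pos hc]
      rw [if_pos hc, hg, ih (PySem.Set.add s x) (n + 1), hadd]
      simp only [Prod.mk.injEq, List.length_append, List.length_cons, List.length_nil]
      exact ⟨trivial, by push_cast; omega⟩
    · have hg : gStep t s x = s := by rw [gStep, if_neg hc]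
      rw [if_neg hc, hg]
      exact ih s n

-- folding hStep over l from a filtered start is filtering the plain add-fold
theorem step_lemma (t s : List Char) (x : Char) :
    hStep t (s.filter (fun y => PySem.Set.contains t y)) x
      = (PySem.Set.add s x).filter (fun y => PySem.Set.contains t y) := by
  simp only [hStep, PySem.Set.add, PySem.Set.contains]
  by_cases ht : x ∈ t <;> by_cases hs : x ∈ s <;>
    simp [ht, hs, List.filter_append]

theorem foldl_hStep_filter (t : PySem.Set Char) :
    ∀ (l : List Char) (s : PySem.Set Char),
      l.foldl (hStep t) (s.filter (fun x => PySem.Set.contains t x))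
        = (l.foldl PySem.Set.add s).filter (fun x => PySem.Set.contains t x) := by
  intro l
  induction l with
  | nil => intro s; rfl
  | cons x xs ih =>
    intro s
    rw [List.foldl_cons, List.foldl_cons, step_lemma]
    exact ih (PySem.Set.add s x)

-- A's value, characterised
theorem cows_char (original guess : String) :
    cows original guess
      = (((PySem.Set.ofList (guess.toList.map PySem.Chars.lowerChar)).filter
            (fun x => PySem.Set.contains
              (PySem.Set.ofList (original.toList.map PySem.Chars.lowerChar)) x)).length : Int) := by
  unfold cows
  simp only []
  set t := original.toList.foldl (fun s letter => PySem.Set.add s (PySem.Chars.lowerChar letter)) PySem.Set.empty with ht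
  have hoset : t = PySem.Set.ofList (original.toList.map PySem.Chars.lowerChar) := by
    rw [ht, PySem.Set.ofList, List.foldl_map]
  have hfold :
      guess.toList.foldl (fun st letter =>
        if PySem.Set.contains t (PySem.Chars.lowerChar letter)
            && !(PySem.Set.contains st.1 (PySem.Chars.lowerChar letter))
        then (PySem.Set.add st.1 (PySem.Chars.lowerChar letter), st.2 + 1) else st)
        (PySem.Set.empty, (0 : Int))
      = (guess.toList.map PySem.Chars.lowerChar).foldl (fun st x =>
        if PySem.Set.contains t x && !(PySem.Set.contains st.1 x)
        then (PySem.Set.add st.1 x, st.2 + 1) else st) (PySem.Set.empty, (0 : Int)) := by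
    rw [List.foldl_map]
  rw [hfold, loop_count t]
  have hg : (guess.toList.map PySem.Chars.lowerChar).foldl (gStep t) PySem.Set.empty
      = (guess.toList.map PySem.Chars.lowerChar).foldl (hStep t) PySem.Set.empty := by
    have : gStep t = hStep t := by funext s x; exact gStep_eq_hStep t s x
    rw [this]
  have hfil : (guess.toList.map PySem.Chars.lowerChar).foldl (hStep t) PySem.Set.empty
      = ((guess.toList.map PySem.Chars.lowerChar).foldl PySem.Set.add PySem.Set.empty).filter
          (fun x => PySem.Set.contains t x) := by
    have := foldl_hStep_filter t (guess.toList.map PySem.Chars.lowerChar) PySem.Set.empty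
    simpa [PySem.Set.empty] using this
  rw [hg, hfil]
  simp [PySem.Set.ofList, PySem.Set.empty, hoset]

-- ---- B side: sortedUnique is a strictly sorted list with the lowered characters ----

theorem suStep_eq (res : List Char) (c : Char) :
    suStep res c = if res.getLast? = some c then res else res ++ [c] := by
  cases res with
  | nil => simp [suStep]
  | cons a l =>
    simp only [suStep, List.isEmpty_cons, Bool.false_or, PySem.List.pyGet?_neg_one]
    by_cases h : (a :: l).getLast? = some c <;> simp [h]

theorem dedupFold_inv :
    ∀ (t res : List Char), t.Pairwise (· ≤ ·) → res.Pairwise (· < ·) →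
      (∀ x ∈ res, ∀ y ∈ t, x ≤ y) →
      (∀ x ∈ res, ∀ m, res.getLast? = some m → x ≤ m) →
      (t.foldl suStep res).Pairwise (· < ·) ∧
        (∀ x, x ∈ t.foldl suStep res ↔ x ∈ res ∨ x ∈ t) := by
  intro t
  induction t with
  | nil =>
    intro res _ hres _ _
    exact ⟨hres, fun x => by simp⟩
  | cons c t' ih =>
    intro res hts hres hle hmax
    have hts' : t'.Pairwise (· ≤ ·) := hts.of_cons
    have hct' : ∀ y ∈ t', c ≤ y := (List.pairwise_cons.mp hts).1
    rw [List.foldl_cons, suStep_eq]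
    by_cases hl : res.getLast? = some c
    · have hc : c ∈ res := List.mem_of_getLast? hl
      rw [if_pos hl]
      have := ih res hts' hres
        (fun x hx y hy => hle x hx y (List.mem_cons_of_mem _ hy)) hmax
      refine ⟨this.1, fun x => ?_⟩
      rw [this.2 x]
      constructor
      · rintro (h | h)
        · exact Or.inl h
        · exact Or.inr (List.mem_cons_of_mem _ h)
      · rintro (h | h)
        · exact Or.inl h
        · rcases List.mem_cons.mp h with rfl | h
          · exact Or.inl hc
          · exact Or.inr h
    · rw [if_neg hl]
      have hltc : ∀ x ∈ res, x < c := by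
        intro x hx
        cases hres' : res.getLast? with
        | none => simp [List.getLast?_eq_none_iff] at hres'; subst hres'; simp at hx
        | some m =>
          have hxm : x ≤ m := hmax x hx m hres'
          have hmres : m ∈ res := List.mem_of_getLast? hres'
          have hmc : m ≤ c := hle m hmres c (List.mem_cons_self)
          have : m ≠ c := fun h => hl (h ▸ hres')
          exact lt_of_le_of_lt hxm (lt_of_le_of_ne hmc this)
      have hres' : (res ++ [c]).Pairwise (· < ·) := by
        rw [List.pairwise_append]
        exact ⟨hres, List.pairwise_singleton _ _, fun x hx y hy => by
          simp only [List.mem_singleton] at hy; subst hy; exact hltc x hx⟩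
      have hle' : ∀ x ∈ res ++ [c], ∀ y ∈ t', x ≤ y := by
        intro x hx y hy
        rcases List.mem_append.mp hx with h | h
        · exact hle x h y (List.mem_cons_of_mem _ hy)
        · simp only [List.mem_singleton] at h; subst h; exact hct' y hy
      have hmax' : ∀ x ∈ res ++ [c], ∀ m, (res ++ [c]).getLast? = some m → x ≤ m := by
        intro x hx m hm
        rw [List.getLast?_append_cons] at hm
        simp at hm
        subst hm
        rcases List.mem_append.mp hx with h | h
        · exact le_of_lt (hltc x h)
        · simp only [List.mem_singleton] at h; subst h; exact le_refl x
      have := ih (res ++ [c]) hts' hres' hle' hmax'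
      refine ⟨this.1, fun x => ?_⟩
      rw [this.2 x]
      simp only [List.mem_append, List.mem_cons]
      tauto

theorem sortedUnique_pairwise (s : String) : (sortedUnique s).Pairwise (· < ·) := by
  unfold sortedUnique
  have h := dedupFold_inv (PySem.List.sorted (s.toList.map PySem.Chars.lowerChar) (fun c => c) false) []
    (PySem.List.sorted_pairwise _ _) (List.Pairwise.nil) (by simp) (by simp)
  exact h.1

theorem mem_sortedUnique (s : String) (x : Char) :
    x ∈ sortedUnique s ↔ x ∈ s.toList.map PySem.Chars.lowerChar := by
  unfold sortedUnique
  have h := dedupFold_inv (PySem.List.sorted (s.toList.map PySem.Chars.lowerChar) (fun c => c) false) []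
    (PySem.List.sorted_pairwise _ _) (List.Pairwise.nil) (by simp) (by simp)
  rw [(h.2 x)]
  simp [PySem.List.mem_sorted]

-- ---- mergeCount of two strictly sorted lists counts the second list's members of the first ----

theorem mergeCount_filter :
    ∀ (a b : List Char), a.Pairwise (· < ·) → b.Pairwise (· < ·) →
      mergeCount a b = ((b.filter (fun y => decide (y ∈ a))).length : Int) := by
  intro a
  induction a with
  | nil =>
    intro b _ _
    simp [mergeCount]
  | cons x xs iha =>
    intro b hxa hb
    induction b with
    | nil => simp [mergeCount]
    | cons y ys ihb =>
      have hxs : xs.Pairwise (· < ·) := hxa.of_cons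
      have hys : ys.Pairwise (· < ·) := hb.of_cons
      have hxlt : ∀ z ∈ xs, x < z := (List.pairwise_cons.mp hxa).1
      have hylt : ∀ z ∈ ys, y < z := (List.pairwise_cons.mp hb).1
      rw [mergeCount]
      by_cases hxy : x = y
      · subst hxy
        rw [if_pos (by simp)]
        have hcong : ys.filter (fun z => decide (z ∈ x :: xs)) = ys.filter (fun z => decide (z ∈ xs)) := by
          apply List.filter_congr
          intro z hz
          have : z ≠ x := ne_of_gt (hylt z hz)
          simp [List.mem_cons, this]
        rw [iha ys hxs hys]
        simp only [List.filter_cons, List.mem_cons]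
        rw [← hcong]
        simp
        ring
      · rw [if_neg (by simp [hxy])]
        by_cases hlt : x < y
        · rw [if_pos hlt]
          have hcong : (y :: ys).filter (fun z => decide (z ∈ x :: xs))
              = (y :: ys).filter (fun z => decide (z ∈ xs)) := by
            apply List.filter_congr
            intro z hz
            have hz' : x < z := by
              rcases List.mem_cons.mp hz with rfl | h
              · exact hlt
              · exact lt_trans hlt (hylt z h)
            have : z ≠ x := ne_of_gt hz'
            simp [List.mem_cons, this]
          rw [hcong]
          exact iha (y :: ys) hxs hb
        · rw [if_neg hlt]
          have hyx : y < x := lt_of_le_of_ne (le_of_not_gt hlt) (Ne.symm hxy)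
          have hynotin : y ∉ x :: xs := by
            intro h
            rcases List.mem_cons.mp h with rfl | h
            · exact hxy rfl
            · exact absurd (hxlt y h) (not_lt_of_gt hyx)
          have hno : ¬(y = x ∨ y ∈ xs) := by simpa [List.mem_cons] using hynotin
          rw [ihb hys]
          simp [hno]

-- ---- assembly ----

theorem cows_eq (original guess : String) : cows original guess = cows_alt original guess := by
  rw [cows_char]
  unfold cows_alt
  set O := original.toList.map PySem.Chars.lowerChar with hO
  set G := guess.toList.map PySem.Chars.lowerChar with hG
  set a := sortedUnique original with ha
  set b := sortedUnique guess with hb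
  rw [mergeCount_filter a b (sortedUnique_pairwise original) (sortedUnique_pairwise guess)]
  -- the two filters have pointwise-equal predicates
  have hpred : ∀ z : Char, PySem.Set.contains (PySem.Set.ofList O) z = decide (z ∈ a) := by
    intro z
    have h1 : z ∈ PySem.Set.ofList O ↔ z ∈ O := PySem.Set.mem_ofList O z
    have h2 : z ∈ a ↔ z ∈ O := mem_sortedUnique original z
    simp only [PySem.Set.contains]
    by_cases h : z ∈ O <;> simp [h1, h2, h]
  have hfil : (PySem.Set.ofList G).filter (fun x => PySem.Set.contains (PySem.Set.ofList O) x)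
      = (PySem.Set.ofList G).filter (fun x => decide (x ∈ a)) := by
    apply List.filter_congr
    intro z _
    exact hpred z
  rw [hfil]
  -- b and (Set.ofList G) are permutations: both nodup with the same members
  have hbnd : b.Nodup := (sortedUnique_pairwise guess).imp (fun h => ne_of_lt h)
  have hgnd : (PySem.Set.ofList G).Nodup := PySem.Set.nodup_ofList G
  have hmem : ∀ z, z ∈ PySem.Set.ofList G ↔ z ∈ b := by
    intro z
    rw [PySem.Set.mem_ofList, mem_sortedUnique guess z]
  have hperm : (PySem.Set.ofList G).Perm b :=
    (List.perm_ext_iff_of_nodup hgnd hbnd).mpr hmem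
  have := (hperm.filter (fun x => decide (x ∈ a))).length_eq
  omega

-- ===== VERDICT (by name: the statement is the Claim_ definition above) =====
theorem cows_spec : Claim_equal_cows := by
  intro original guess _
  unfold Spec_cows
  exact cows_eq original guess
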